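-- pv_equiv track=rewrite | github.com/ManideepBangaru/PDFCompareNLP | ReUsableCM/Scripts/ChangeManagementRedesign.py | PageCorrectionList1
-- ===== SOURCE A (Python) =====
-- def PageCorrectionList1(Page):
--     temp = Page.split('.')
--     for rot in range(len(temp)):
--         temp[rot] = temp[rot].strip()
--         if rot == 0:
--             pass
--         elif len(temp[rot])==1:
--             temp[rot-1] = temp[rot-1]+'.'+temp[rot]
--             temp[rot] = ''
--     temp = [i for i in temp if i]
--     return temp
-- ===== SOURCE B (Python) =====
-- def PageCorrectionList1(Page):
--     parts = [p.strip() for p in Page.split('.')]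
--     n = len(parts)
--     out = []
--     for i in range(n):
--         base = '' if (i >= 1 and len(parts[i]) == 1) else parts[i]
--         if i + 1 < n and len(parts[i + 1]) == 1:
--             base = base + '.' + parts[i + 1]
--         if base:
--             out.append(base)
--     return out
-- ===== Notes on version B (the rewrite author's own statement) =====
-- stated objective: simpler
-- what changed: Replaces A's backward in-place mutation of the split list (merging single-char pieces into the previous physical slot and blanking) with a pure forward pass that computes each output element from parts[i] and a one-element lookahead, appending only non-empty results.
import Mathlib
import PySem

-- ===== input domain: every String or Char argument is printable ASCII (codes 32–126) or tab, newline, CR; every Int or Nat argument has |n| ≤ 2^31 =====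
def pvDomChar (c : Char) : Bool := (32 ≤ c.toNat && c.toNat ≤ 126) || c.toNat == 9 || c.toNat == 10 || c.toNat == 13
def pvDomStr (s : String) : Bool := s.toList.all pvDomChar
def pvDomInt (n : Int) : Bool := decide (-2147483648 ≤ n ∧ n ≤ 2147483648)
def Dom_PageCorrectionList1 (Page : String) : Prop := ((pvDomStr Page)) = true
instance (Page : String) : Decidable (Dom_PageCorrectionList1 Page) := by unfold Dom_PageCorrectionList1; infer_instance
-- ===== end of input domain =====

-- B replaces A's backward in-place merge-and-blank mutation with a pure forward lookahead pass (simpler; same O(n) cost).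

-- ===== PORT A =====
-- A mutates the split pieces in place; the pieces are ported as List Char (PySem strings), wrapped with String.ofList at the end.
-- pvStepA is the body of A's `for rot in range(len(temp))` loop, step for step.
def pvStepA (temp0 : List (List Char)) (rot : Nat) : List (List Char) :=
  let temp := temp0.set rot (PySem.Chars.strip (temp0.getD rot []))
  if rot = 0 then temp
  else if (temp.getD rot []).length = 1 then
    let temp' := temp.set (rot - 1) (temp.getD (rot - 1) [] ++ '.' :: temp.getD rot [])
    temp'.set rot []
  else temp

def PageCorrectionList1 (Page : String) : List String :=
  let temp0 : List (List Char) := PySem.Chars.splitOn Page.toList ['.']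
  let temp := (List.range temp0.length).foldl pvStepA temp0
  (temp.filter (fun i => i ≠ [])).map String.ofList

-- ===== PORT B =====
def PageCorrectionList1_alt (Page : String) : List String :=
  let parts := (PySem.Chars.splitOn Page.toList ['.']).map PySem.Chars.strip
  let n := parts.length
  ((List.range n).foldl (fun out i =>
    let base := if 1 ≤ i ∧ (parts.getD i []).length = 1 then [] else parts.getD i []
    let base := if i + 1 < n ∧ (parts.getD (i + 1) []).length = 1
                then base ++ '.' :: parts.getD (i + 1) [] else base
    if base ≠ [] then out ++ [base] else out) []).map String.ofList

-- ===== PRECONDITION & SPEC =====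
def Spec_PageCorrectionList1 (Page : String) (out : List String) : Prop := out = PageCorrectionList1_alt Page
instance (Page : String) (out : List String) : Decidable (Spec_PageCorrectionList1 Page out) := by unfold Spec_PageCorrectionList1; infer_instance

-- ===== CLAIM (what is proved, stated in full; the proofs are below) =====
def Claim_equal_PageCorrectionList1 : Prop := ∀ (Page : String), Dom_PageCorrectionList1 Page → Spec_PageCorrectionList1 Page (PageCorrectionList1 Page)

-- ===== LEMMAS AND PROOFS =====

-- the value B computes for slot j out of n stripped parts ps
def pvBase (ps : List (List Char)) (j : Nat) : List Char :=
  if 1 ≤ j ∧ (ps.getD j []).length = 1 then [] else ps.getD j []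

def pvVal (ps : List (List Char)) (k j : Nat) : List Char :=
  if j + 1 < k ∧ (ps.getD (j + 1) []).length = 1
  then pvBase ps j ++ '.' :: ps.getD (j + 1) [] else pvBase ps j

-- the first k slot values are unchanged by seeing part k unless it is single-char (then slot k-1 gains it)
lemma pvPrefix_nomerge (ps : List (List Char)) (k : Nat)
    (hlen : ¬ (ps.getD k []).length = 1) :
    (List.range k).map (pvVal ps k) = (List.range k).map (pvVal ps (k + 1)) := by
  have hlen' : ¬ ((ps[k]?.getD []).length = 1) := by
    simpa [List.getD_eq_getElem?_getD] using hlen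
  apply List.ext_getElem (by simp)
  intro j hj1 hj2
  have hjk : j < k := by simpa using hj1
  rw [List.getElem_map, List.getElem_range, List.getElem_map, List.getElem_range]
  by_cases hjk1 : j + 1 = k
  · have h1 : ¬ (j + 1 < k) := by omega
    have h2 : j + 1 < k + 1 := by omega
    simp [pvVal, h1, h2, hjk1, hlen']
  · have hlt : j + 1 < k := by omega
    have hlt' : j + 1 < k + 1 := by omega
    simp [pvVal, hlt, hlt']

lemma pvPrefix_merge (ps : List (List Char)) (k : Nat) (hk1 : 1 ≤ k)
    (hlen : (ps.getD k []).length = 1) :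
    ((List.range k).map (pvVal ps k)).set (k - 1)
        (pvBase ps (k - 1) ++ '.' :: ps.getD k [])
      = (List.range k).map (pvVal ps (k + 1)) := by
  have hlen' : ((ps[k]?.getD []).length = 1) := by
    simpa [List.getD_eq_getElem?_getD] using hlen
  apply List.ext_getElem (by simp)
  intro j hj1 hj2
  have hjk : j < k := by simpa using hj2
  rw [List.getElem_set, List.getElem_map, List.getElem_range]
  by_cases hjk1 : k - 1 = j
  · have hj' : j + 1 = k := by omega
    have h2 : j + 1 < k + 1 := by omega
    rw [if_pos hjk1]
    have hkk : k - 1 + 1 = k := by omega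
    simp [pvVal, hlen', hkk, hjk1.symm]
  · rw [if_neg hjk1, List.getElem_map, List.getElem_range]
    have hlt : j + 1 < k := by omega
    have hlt' : j + 1 < k + 1 := by omega
    simp [pvVal, hlt, hlt']

-- loop invariant for A: after k steps the first k slots hold B's values (as of k parts seen) and the rest is untouched
lemma pvLoopA (t0 : List (List Char)) (k : Nat) (hk : k ≤ t0.length) :
    (List.range k).foldl pvStepA t0
      = (List.range k).map (pvVal (t0.map PySem.Chars.strip) k) ++ t0.drop k := by
  induction k with
  | zero => simp
  | succ k ih =>
    have hk' : k < t0.length := hk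
    have hps : (t0.map PySem.Chars.strip).getD k [] = PySem.Chars.strip t0[k] := by
      simp [List.getD_eq_getElem?_getD, hk']
    set ps := t0.map PySem.Chars.strip with hpsdef
    rw [List.range_succ, List.foldl_append, ih (le_of_lt hk'), List.map_append]
    rw [List.drop_eq_getElem_cons hk']
    set P := (List.range k).map (pvVal ps k) with hP
    have hPlen : P.length = k := by simp [hP]
    have hget : (P ++ t0[k] :: t0.drop (k + 1)).getD k [] = t0[k] := by
      rw [List.getD_append_right _ _ _ _ hPlen.le]
      simp only [hPlen, Nat.sub_self, List.getD_cons_zero]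
    have hset : (P ++ t0[k] :: t0.drop (k + 1)).set k (PySem.Chars.strip t0[k])
        = P ++ PySem.Chars.strip t0[k] :: t0.drop (k + 1) := by
      rw [List.set_append, if_neg (by omega)]
      rw [hPlen, Nat.sub_self, List.set_cons_zero]
    rw [List.append_assoc]
    by_cases hk0 : k = 0
    · subst hk0
      simp only [List.foldl_cons, List.foldl_nil, pvStepA, hget, hset]
      simp [hP, pvVal, pvBase, hpsdef, hk']
    · -- k ≥ 1
      have hk1 : 1 ≤ k := Nat.one_le_iff_ne_zero.mpr hk0
      have hgetk : (P ++ PySem.Chars.strip t0[k] :: t0.drop (k + 1)).getD k []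
          = PySem.Chars.strip t0[k] := by
        rw [List.getD_append_right _ _ _ _ hPlen.le]
        simp only [hPlen, Nat.sub_self, List.getD_cons_zero]
      have hgetk1 : (P ++ PySem.Chars.strip t0[k] :: t0.drop (k + 1)).getD (k - 1) []
          = pvBase ps (k - 1) := by
        rw [List.getD_append _ _ _ _ (by omega)]
        rw [hP, PySem.List.getD_map_range _ _ _ _ (by omega)]
        have hnk : ¬ (k - 1 + 1 < k) := by omega
        simp [pvVal, hnk]
      by_cases hlen : (PySem.Chars.strip t0[k]).length = 1
      · -- merge into the previous physical slot, blank slot k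
        simp only [List.foldl_cons, List.foldl_nil, pvStepA, hget, hset, if_neg hk0,
          hgetk, hgetk1, if_pos hlen]
        rw [List.set_append, if_pos (by omega)]
        rw [List.set_append, if_neg (by simp [hPlen])]
        rw [List.length_set, hPlen, Nat.sub_self, List.set_cons_zero]
        rw [← hps] at hlen ⊢
        have hlen' : ((ps[k]?.getD []).length = 1) := by
          simpa [List.getD_eq_getElem?_getD] using hlen
        rw [hP, pvPrefix_merge ps k hk1 hlen]
        have hvk : pvVal ps (k + 1) k = [] := by
          simp [pvVal, pvBase, hk1, hlen']
        simp [hvk]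
      · -- no merge: slot k keeps its stripped value
        simp only [List.foldl_cons, List.foldl_nil, pvStepA, hget, hset, if_neg hk0,
          hgetk, if_neg hlen]
        rw [← hps] at hlen ⊢
        have hlen' : ¬ ((ps[k]?.getD []).length = 1) := by
          simpa [List.getD_eq_getElem?_getD] using hlen
        rw [hP, pvPrefix_nomerge ps k hlen]
        have hvk : pvVal ps (k + 1) k = ps.getD k [] := by
          simp [pvVal, pvBase, hlen']
        simp [hvk]

-- ===== VERDICT (by name: the statement is the Claim_ definition above) =====
theorem PageCorrectionList1_spec : Claim_equal_PageCorrectionList1 := by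
  intro Page _
  unfold Spec_PageCorrectionList1 PageCorrectionList1 PageCorrectionList1_alt
  dsimp only
  set t0 := PySem.Chars.splitOn Page.toList ['.'] with ht0
  set ps := t0.map PySem.Chars.strip with hps
  have hn : ps.length = t0.length := by simp [hps]
  rw [pvLoopA t0 t0.length le_rfl, List.drop_length, List.append_nil]
  -- B's fold body is pvVal
  have hB : (fun (out : List (List Char)) (i : Nat) =>
      if (if i + 1 < ps.length ∧ (ps.getD (i + 1) []).length = 1
          then (if 1 ≤ i ∧ (ps.getD i []).length = 1 then [] else ps.getD i [])
            ++ '.' :: ps.getD (i + 1) []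
          else (if 1 ≤ i ∧ (ps.getD i []).length = 1 then [] else ps.getD i [])) ≠ []
      then out ++ [if i + 1 < ps.length ∧ (ps.getD (i + 1) []).length = 1
          then (if 1 ≤ i ∧ (ps.getD i []).length = 1 then [] else ps.getD i [])
            ++ '.' :: ps.getD (i + 1) []
          else (if 1 ≤ i ∧ (ps.getD i []).length = 1 then [] else ps.getD i [])]
      else out)
      = fun out i => if pvVal ps ps.length i ≠ [] then out ++ [pvVal ps ps.length i] else out := by
    funext out i; simp only [pvVal, pvBase]
  rw [hB, PySem.List.foldl_append_ite (fun i => pvVal ps ps.length i ≠ []) (pvVal ps ps.length)]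
  rw [List.nil_append, List.filter_map, hn]
  congr 1
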